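-- pv_equiv track=rewrite | github.com/deckercjames/img_to_sand | testing/test_linker/test_linkable_entity/test_linkable_entity_blob.py | helper_get_mask_with_gateway_points_as_str
-- ===== SOURCE A (Python) =====
-- def helper_get_mask_with_gateway_points_as_str(grid_mask, gateway_points):
--     buf = ""
--     for r, row in enumerate(grid_mask):
--         for c, cell in enumerate(row):
--             if (r,c) in gateway_points:
--                 buf += '#'
--             elif cell:
--                 buf += '.'
--             else:
--                 buf += ' '
--         buf += "\n"
--     return buf
-- ===== SOURCE B (Python) =====
-- def helper_get_mask_with_gateway_points_as_str(grid_mask, gateway_points):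
--     chars = [['.' if cell else ' ' for cell in row] for row in grid_mask]
--     for r, c in gateway_points:
--         if 0 <= r < len(chars) and 0 <= c < len(chars[r]):
--             chars[r][c] = '#'
--     return ''.join(''.join(row) + '\n' for row in chars)
-- ===== Notes on version B (the rewrite author's own statement) =====
-- stated objective: faster
-- what changed: B builds a character canvas in one pass over the grid and then paints '#' only at the in-bounds gateway points, instead of A's per-cell linear membership scan of gateway_points.
import Mathlib
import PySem

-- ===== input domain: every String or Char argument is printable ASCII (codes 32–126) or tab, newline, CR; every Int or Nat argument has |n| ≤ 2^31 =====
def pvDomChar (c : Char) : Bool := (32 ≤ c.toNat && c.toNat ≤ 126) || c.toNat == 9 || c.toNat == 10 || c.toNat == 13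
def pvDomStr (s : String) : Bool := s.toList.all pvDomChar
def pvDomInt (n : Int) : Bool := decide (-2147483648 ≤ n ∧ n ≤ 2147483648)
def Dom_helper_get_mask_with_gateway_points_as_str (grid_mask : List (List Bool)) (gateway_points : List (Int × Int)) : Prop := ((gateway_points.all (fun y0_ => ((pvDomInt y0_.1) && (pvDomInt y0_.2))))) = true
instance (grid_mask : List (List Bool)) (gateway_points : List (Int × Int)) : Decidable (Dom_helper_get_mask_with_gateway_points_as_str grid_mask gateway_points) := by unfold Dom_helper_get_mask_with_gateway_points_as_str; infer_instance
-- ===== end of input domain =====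

-- B replaces A's per-cell membership scan of gateway_points by a canvas-then-paint two-pass
-- structure (build the '.'/' ' grid once, then set '#' at each in-bounds gateway point): faster.

-- ===== PORT A =====
def helper_get_mask_with_gateway_points_as_str (grid_mask : List (List Bool)) (gateway_points : List (Int × Int)) : String :=
  String.mk ((PySem.List.enumerate grid_mask 0).foldl
    (fun buf rrow =>
      ((PySem.List.enumerate rrow.2 0).foldl
        (fun b cc => b ++ (if (rrow.1, cc.1) ∈ gateway_points then ['#'] else if cc.2 then ['.'] else [' '])) buf)
      ++ ['\n']) [])

-- ===== PORT B =====
def pvCanvas (grid_mask : List (List Bool)) : List (List Char) :=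
  grid_mask.map (fun row => row.map (fun cell => if cell then '.' else ' '))

def pvPaint (ch : List (List Char)) (p : Int × Int) : List (List Char) :=
  if 0 ≤ p.1 ∧ p.1 < (ch.length : Int) ∧ 0 ≤ p.2 ∧ p.2 < ((ch.getD p.1.toNat []).length : Int)
  then ch.modify p.1.toNat (fun row => row.set p.2.toNat '#')
  else ch

def helper_get_mask_with_gateway_points_as_str_alt (grid_mask : List (List Bool)) (gateway_points : List (Int × Int)) : String :=
  String.mk ((gateway_points.foldl pvPaint (pvCanvas grid_mask)).flatMap (fun row => row ++ ['\n']))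

-- ===== PRECONDITION & SPEC =====
def Spec_helper_get_mask_with_gateway_points_as_str (grid_mask : List (List Bool)) (gateway_points : List (Int × Int)) (out : String) : Prop := out = helper_get_mask_with_gateway_points_as_str_alt grid_mask gateway_points
instance (grid_mask : List (List Bool)) (gateway_points : List (Int × Int)) (out : String) : Decidable (Spec_helper_get_mask_with_gateway_points_as_str grid_mask gateway_points out) := by unfold Spec_helper_get_mask_with_gateway_points_as_str; infer_instance

-- ===== CLAIM (what is proved, stated in full; the proofs are below) =====
def Claim_equal_helper_get_mask_with_gateway_points_as_str : Prop := ∀ (grid_mask : List (List Bool)) (gateway_points : List (Int × Int)), Dom_helper_get_mask_with_gateway_points_as_str grid_mask gateway_points → Spec_helper_get_mask_with_gateway_points_as_str grid_mask gateway_points (helper_get_mask_with_gateway_points_as_str grid_mask gateway_points)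

-- ===== LEMMAS AND PROOFS =====

-- pointwise description of a painted grid: cell (r,c) becomes '#' iff (r,c) ∈ gps
def pvMark (gps : List (Int × Int)) (ch : List (List Char)) : List (List Char) :=
  (PySem.List.enumerate ch 0).map (fun rrow =>
    (PySem.List.enumerate rrow.2 0).map (fun cc => if (rrow.1, cc.1) ∈ gps then '#' else cc.2))

lemma pvMark_nil (ch : List (List Char)) : pvMark [] ch = ch := by
  simp [pvMark, PySem.List.map_snd_enumerate]

lemma getElem?_pvPaint (ch : List (List Char)) (p : Int × Int) (r : Nat) :
    (pvPaint ch p)[r]? = (ch[r]?).map (fun row =>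
      if p.1 = (r : Int) ∧ 0 ≤ p.2 ∧ p.2 < (row.length : Int) then row.set p.2.toNat '#' else row) := by
  cases hrow : ch[r]? with
  | none =>
    unfold pvPaint
    split_ifs with h <;> simp [List.getElem?_modify, hrow]
  | some row =>
    have hr : r < ch.length := (List.getElem?_eq_some_iff.mp hrow).1
    have hlen : p.1.toNat = r → ch.getD p.1.toNat [] = row := by
      intro he
      simp [List.getD_eq_getElem?_getD, he, hrow]
    unfold pvPaint
    split_ifs with h
    · rcases h with ⟨h1, h2, h3, h4⟩
      simp only [List.getElem?_modify, hrow, Option.map_eq_map, Option.map_some]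
      congr 1
      by_cases he : p.1.toNat = r
      · have hre : p.1 = (r : Int) := by omega
        rw [if_pos he, if_pos ⟨hre, h3, by rw [← hlen he]; exact h4⟩]
      · have hne : ¬(p.1 = (r : Int) ∧ 0 ≤ p.2 ∧ p.2 < (row.length : Int)) := by
          rintro ⟨hre, -, -⟩; exact he (by omega)
        rw [if_neg he, if_neg hne]
    · simp only [hrow, Option.map_some, Option.some.injEq]
      have hne : ¬(p.1 = (r : Int) ∧ 0 ≤ p.2 ∧ p.2 < (row.length : Int)) := by
        rintro ⟨hre, h3, h4⟩
        apply h
        have he : p.1.toNat = r := by omega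
        exact ⟨by omega, by omega, h3, by rw [hlen he]; exact h4⟩
      rw [if_neg hne]

lemma pvMark_paint (gps : List (Int × Int)) (p : Int × Int) (ch : List (List Char)) :
    pvMark gps (pvPaint ch p) = pvMark (p :: gps) ch := by
  obtain ⟨p1, p2⟩ := p
  apply List.ext_getElem?
  intro r
  simp only [pvMark, List.getElem?_map, PySem.List.getElem?_enumerate, getElem?_pvPaint,
    Option.map_map]
  cases hrow : ch[r]? with
  | none => rfl
  | some row =>
    simp only [Option.map_some, Function.comp]
    congr 1
    split_ifs with hcond
    · -- (p1, p2) = (r, p2) with 0 ≤ p2 < row.length : the set cell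
      rcases hcond with ⟨h1, h2, h3⟩
      apply List.ext_getElem?
      intro c
      simp only [List.getElem?_map, PySem.List.getElem?_enumerate, List.getElem?_set,
        Option.map_map, Function.comp_apply, zero_add]
      by_cases hc : p2.toNat = c
      · have hcl : c < row.length := by omega
        have hm : ((r : Int), (c : Int)) ∈ (p1, p2) :: gps := by
          simp only [List.mem_cons]
          left
          rw [Prod.ext_iff]
          exact ⟨by simpa using h1.symm, by simp; omega⟩
        rw [List.getElem?_eq_getElem hcl]
        simp only [hc, if_pos rfl, if_pos hcl, Option.map_some, Function.comp_apply]
        simp [hm]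
      · simp only [if_neg hc]
        cases hrc : row[c]? with
        | none => simp
        | some x =>
          simp only [Option.map_some, Option.some.injEq, Function.comp_apply]
          have hiff : (((r : Int), (c : Int)) ∈ (p1, p2) :: gps) ↔ (((r : Int), (c : Int)) ∈ gps) := by
            simp only [List.mem_cons, or_iff_right_iff_imp]
            intro he
            exfalso
            have := (Prod.ext_iff.mp he).2
            simp at this
            omega
          rw [if_congr hiff rfl rfl]
    · -- p does not hit row r: membership in (p1,p2) :: gps reduces to gps on cells of row
      apply List.ext_getElem?
      intro c
      simp only [List.getElem?_map, PySem.List.getElem?_enumerate, Option.map_map,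
        Function.comp_apply, zero_add]
      cases hrc : row[c]? with
      | none => simp
      | some x =>
        have hcl : c < row.length := (List.getElem?_eq_some_iff.mp hrc).1
        simp only [Option.map_some, Option.some.injEq, Function.comp_apply]
        have hiff : (((r : Int), (c : Int)) ∈ (p1, p2) :: gps) ↔ (((r : Int), (c : Int)) ∈ gps) := by
          simp only [List.mem_cons, or_iff_right_iff_imp]
          intro he
          exfalso
          apply hcond
          have h1 := (Prod.ext_iff.mp he).1
          have h2 := (Prod.ext_iff.mp he).2
          simp at h1 h2
          refine ⟨by omega, by omega, by omega⟩
        rw [if_congr hiff rfl rfl]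

lemma pvFoldPaint (gps : List (Int × Int)) (ch : List (List Char)) :
    gps.foldl pvPaint ch = pvMark gps ch := by
  induction gps generalizing ch with
  | nil => simp [pvMark_nil]
  | cons p gps ih => rw [List.foldl_cons, ih, pvMark_paint]

lemma pvEnumerate_map {α β : Type} (f : α → β) (xs : List α) (s : Int) :
    PySem.List.enumerate (xs.map f) s = (PySem.List.enumerate xs s).map (fun p => (p.1, f p.2)) := by
  apply List.ext_getElem?
  intro k
  simp [PySem.List.getElem?_enumerate, Option.map_map, Function.comp_def]

lemma pvIteChars (a b : Prop) [Decidable a] [Decidable b] :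
    (if a then ['#'] else if b then ['.'] else [' ']) = [if a then '#' else if b then '.' else ' '] := by
  split_ifs <;> rfl

-- ===== VERDICT (by name: the statement is the Claim_ definition above) =====
theorem helper_get_mask_with_gateway_points_as_str_spec : Claim_equal_helper_get_mask_with_gateway_points_as_str := by
  intro gm gps _
  unfold Spec_helper_get_mask_with_gateway_points_as_str
  unfold helper_get_mask_with_gateway_points_as_str helper_get_mask_with_gateway_points_as_str_alt
  rw [pvFoldPaint]
  congr 1
  simp only [pvIteChars, PySem.List.foldl_append_singleton_eq_map, List.append_assoc,
    PySem.List.foldl_append_eq_flatMap, List.nil_append]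
  simp only [pvMark, pvCanvas, pvEnumerate_map, List.map_map, List.flatMap_map, Function.comp_def]
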